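-- pv_equiv track=rewrite | github.com/klipspringerc/cs598-dl4h-project | data.py | split_sequence_hot_code
-- ===== SOURCE A (Python) =====
-- num_codes = 492
--
-- def split_sequence_hot_code(docs, labels):
--     split_sequences = []
--     split_labels = []
--     idx_to_patient = []
--     for i in range(len(docs)):
--         patient_seq = docs[i]
--         patient_labels = labels[i]
--         for j in range(len(patient_seq)):
--             sub_seq = patient_seq[0:j + 1]
--             seq_hc = []
--             for visit in sub_seq:
--                 visit_hc = [0] * (num_codes - 1)
--                 for mcode in visit:
--                     visit_hc[mcode - 1] = 1
--                 seq_hc.append(visit_hc)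
--             split_sequences.append(seq_hc)
--             split_labels.append(patient_labels[j])
--             idx_to_patient.append(i)
--     return split_sequences, split_labels
-- ===== SOURCE B (Python) =====
-- num_codes = 492
--
--
-- def _one_hot(visit):
--     hc = [0] * (num_codes - 1)
--     for mcode in visit:
--         hc[mcode - 1] = 1
--     return hc
--
--
-- def split_sequence_hot_code(docs, labels):
--     # Encode each visit exactly once, then build the prefix lists incrementally
--     # by extending the previous prefix, instead of re-encoding every visit of
--     # every prefix from scratch.
--     split_sequences = []
--     split_labels = []
--     for patient_seq, patient_labels in zip(docs, labels):
--         hots = [_one_hot(visit) for visit in patient_seq]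
--         prefix = []
--         for j, hot in enumerate(hots):
--             prefix = prefix + [hot]
--             split_sequences.append(prefix)
--             split_labels.append(patient_labels[j])
--     return split_sequences, split_labels
-- ===== Notes on version B (the rewrite author's own statement) =====
-- stated objective: alternative
-- what changed: Each visit is one-hot encoded exactly once and the prefix subsequences are built incrementally by extending the previous prefix, instead of re-encoding every visit of every prefix in a nested rescan; intended as faster (measured 1.53x at the largest timing size, below the confirmation bar).
import Mathlib
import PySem

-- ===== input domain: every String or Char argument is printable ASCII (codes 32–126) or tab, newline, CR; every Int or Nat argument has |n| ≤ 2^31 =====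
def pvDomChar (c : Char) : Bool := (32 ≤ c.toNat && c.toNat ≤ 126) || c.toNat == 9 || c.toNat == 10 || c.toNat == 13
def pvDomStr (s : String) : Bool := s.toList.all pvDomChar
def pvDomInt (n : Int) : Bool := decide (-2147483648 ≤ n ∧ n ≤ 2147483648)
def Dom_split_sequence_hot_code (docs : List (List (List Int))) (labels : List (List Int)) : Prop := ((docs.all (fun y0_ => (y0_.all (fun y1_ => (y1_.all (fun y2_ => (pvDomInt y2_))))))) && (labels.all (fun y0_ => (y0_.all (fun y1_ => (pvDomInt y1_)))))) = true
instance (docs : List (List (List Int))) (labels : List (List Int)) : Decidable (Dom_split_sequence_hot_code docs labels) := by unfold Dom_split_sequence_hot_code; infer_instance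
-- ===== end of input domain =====

-- B re-encodes each visit once and extends prefixes incrementally instead of A's
-- per-prefix full re-encoding; equivalence of the return values is proved on Pre_.

-- ===== PORT A =====
def pvNumCodes : Int := 492

def split_sequence_hot_code (docs : List (List (List Int))) (labels : List (List Int)) : List (List (List Int)) × List Int :=
  -- state = (split_sequences, split_labels, idx_to_patient); the last is built but not returned
  let res :=
    (PySem.List.pyRange 0 (docs.length : Int) 1).foldl
      (fun (st : List (List (List Int)) × List Int × List Int) i =>
        let patient_seq := PySem.List.pyGetD docs i []
        let patient_labels := PySem.List.pyGetD labels i []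
        (PySem.List.pyRange 0 (patient_seq.length : Int) 1).foldl
          (fun st j =>
            let sub_seq := PySem.List.slice patient_seq (some 0) (some (j + 1))
            let seq_hc := sub_seq.foldl
              (fun seq_hc visit =>
                let visit_hc := List.replicate (pvNumCodes - 1).toNat (0 : Int)
                let visit_hc := visit.foldl (fun hc mcode => PySem.List.pySetD hc (mcode - 1) 1) visit_hc
                seq_hc ++ [visit_hc]) []
            (st.1 ++ [seq_hc], st.2.1 ++ [PySem.List.pyGetD patient_labels j 0], st.2.2 ++ [i]))
          st)
      ([], [], [])
  (res.1, res.2.1)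

-- ===== PORT B =====
def pvEncodeVisit (visit : List Int) : List Int :=
  visit.foldl (fun hc mcode => PySem.List.pySetD hc (mcode - 1) 1)
    (List.replicate (pvNumCodes - 1).toNat (0 : Int))

def split_sequence_hot_code_alt (docs : List (List (List Int))) (labels : List (List Int)) : List (List (List Int)) × List Int :=
  (docs.zip labels).foldl
    (fun (st : List (List (List Int)) × List Int) pl =>
      let hots := pl.1.map pvEncodeVisit
      let r :=
        (PySem.List.enumerate hots).foldl
          (fun (t : List (List Int) × List (List (List Int)) × List Int) jh =>
            let pfx := t.1 ++ [jh.2]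
            (pfx, t.2.1 ++ [pfx], t.2.2 ++ [PySem.List.pyGetD pl.2 jh.1 0]))
          ([], st.1, st.2)
      (r.2.1, r.2.2))
    ([], [])

-- ===== PRECONDITION & SPEC =====
-- Pre_ excludes exactly the inputs where Python A raises IndexError: fewer label
-- rows than patients, a label row shorter than its visit sequence, or a medical
-- code outside -490..491 (index mcode-1 out of range for the 491-slot vector).
def Pre_split_sequence_hot_code (docs : List (List (List Int))) (labels : List (List Int)) : Prop :=
  docs.length ≤ labels.length ∧
  ∀ pl ∈ docs.zip labels, pl.1.length ≤ pl.2.length ∧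
    ∀ visit ∈ pl.1, ∀ m ∈ visit, -490 ≤ m ∧ m ≤ 491
instance (docs : List (List (List Int))) (labels : List (List Int)) : Decidable (Pre_split_sequence_hot_code docs labels) := by unfold Pre_split_sequence_hot_code; infer_instance

def pvWitness_split_sequence_hot_code : List (List (List Int)) × List (List Int) :=
  ([[[1], [2, 3]], [[491]]], [[0, 1], [1]])

def Spec_split_sequence_hot_code (docs : List (List (List Int))) (labels : List (List Int)) (out : List (List (List Int)) × List Int) : Prop := out = split_sequence_hot_code_alt docs labels
instance (docs : List (List (List Int))) (labels : List (List Int)) (out : List (List (List Int)) × List Int) : Decidable (Spec_split_sequence_hot_code docs labels out) := by unfold Spec_split_sequence_hot_code; infer_instance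

-- ===== CLAIM (what is proved, stated in full; the proofs are below) =====
def Claim_equal_split_sequence_hot_code : Prop := ∀ (docs : List (List (List Int))) (labels : List (List Int)), Dom_split_sequence_hot_code docs labels → Pre_split_sequence_hot_code docs labels → Spec_split_sequence_hot_code docs labels (split_sequence_hot_code docs labels)

-- ===== LEMMAS AND PROOFS =====

-- the per-patient contribution both programs append to the two output lists
def pvStepSem (st : List (List (List Int)) × List Int) (pl : List (List Int) × List Int) :
    List (List (List Int)) × List Int :=
  (st.1 ++ (List.range pl.1.length).map (fun k => (pl.1.take (k + 1)).map pvEncodeVisit),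
   st.2 ++ (List.range pl.1.length).map (fun k : Nat => PySem.List.pyGetD pl.2 (k : Int) 0))

-- B's inner loop over enumerate: closed form
theorem pv_B_inner (labs : List Int) (hots : List (List Int)) :
    ∀ (s : Int) (pre : List (List Int)) (seqs : List (List (List Int))) (lbs : List Int),
    (PySem.List.enumerate hots s).foldl
      (fun (t : List (List Int) × List (List (List Int)) × List Int) jh =>
        let pfx := t.1 ++ [jh.2]
        (pfx, t.2.1 ++ [pfx], t.2.2 ++ [PySem.List.pyGetD labs jh.1 0]))
      (pre, seqs, lbs)
    = (pre ++ hots,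
       seqs ++ (List.range hots.length).map (fun k => pre ++ hots.take (k + 1)),
       lbs ++ (List.range hots.length).map (fun k : Nat => PySem.List.pyGetD labs (s + (k : Int)) 0)) := by
  induction hots with
  | nil => simp [PySem.List.enumerate_nil]
  | cons h rest ih =>
    intro s pre seqs lbs
    rw [PySem.List.enumerate_cons]
    simp only [List.foldl_cons]
    rw [ih]
    refine Prod.ext ?_ (Prod.ext ?_ ?_)
    · simp
    · simp [List.range_succ_eq_map, List.map_map, Function.comp, List.take_succ_cons]
    · simp [List.range_succ_eq_map, List.map_map, Function.comp, Nat.cast_add,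
        add_comm, add_left_comm]

-- A's inner loop over j: closed form (n independent of seq so induction goes through)
theorem pv_A_inner (seq : List (List Int)) (labs : List Int) (i : Int) (n : Nat) :
    ∀ (st : List (List (List Int)) × List Int × List Int),
    (PySem.List.pyRange 0 (n : Int) 1).foldl
      (fun st j =>
        (st.1 ++ [(PySem.List.slice seq (some 0) (some (j + 1))).map pvEncodeVisit],
         st.2.1 ++ [PySem.List.pyGetD labs j 0],
         st.2.2 ++ [i]))
      st
    = (st.1 ++ (List.range n).map (fun k => (seq.take (k + 1)).map pvEncodeVisit),
       st.2.1 ++ (List.range n).map (fun k : Nat => PySem.List.pyGetD labs (k : Int) 0),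
       st.2.2 ++ List.replicate n i) := by
  induction n with
  | zero => intro st; simp [PySem.List.pyRange_one_eq_nil]
  | succ m ih =>
    intro st
    have hc : ((m + 1 : Nat) : Int) = (m : Int) + 1 := by push_cast; ring
    rw [hc, PySem.List.pyRange_one_succ_right (by positivity), List.foldl_append, ih]
    have hsl : PySem.List.slice seq none (some ((m : Int) + 1)) = seq.take (m + 1) := by
      exact_mod_cast PySem.List.slice_to_natCast seq (m + 1)
    simp [hsl, List.map_take, List.range_succ, List.replicate_succ', List.append_assoc]

-- A's nested per-visit encoding loop is pvEncodeVisit (definitional)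
theorem pv_enc_eq (visit : List Int) :
    visit.foldl (fun hc mcode => PySem.List.pySetD hc (mcode - 1) 1)
      (List.replicate (pvNumCodes - 1).toNat (0 : Int)) = pvEncodeVisit visit := rfl

-- B's per-patient step is pvStepSem
theorem pv_B_step (st : List (List (List Int)) × List Int) (pl : List (List Int) × List Int) :
    (fun (st : List (List (List Int)) × List Int) (pl : List (List Int) × List Int) =>
      let hots := pl.1.map pvEncodeVisit
      let r :=
        (PySem.List.enumerate hots).foldl
          (fun (t : List (List Int) × List (List (List Int)) × List Int) jh =>
            let pfx := t.1 ++ [jh.2]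
            (pfx, t.2.1 ++ [pfx], t.2.2 ++ [PySem.List.pyGetD pl.2 jh.1 0]))
          ([], st.1, st.2)
      (r.2.1, r.2.2)) st pl = pvStepSem st pl := by
  simp only [pv_B_inner]
  unfold pvStepSem
  simp [List.map_take]

-- A's outer loop, projected to the two returned components, is the fold of pvStepSem
theorem pv_A_outer (DOCS : List (List (List Int))) (LABS : List (List Int)) :
    ∀ (ds : List (List (List Int))) (ls : List (List Int)) (a : Nat)
      (st : List (List (List Int)) × List Int × List Int),
    (∀ k, (hk : k < ds.length) → PySem.List.pyGetD DOCS ((a + k : Nat) : Int) [] = ds[k]) →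
    (∀ k, (hk : k < ls.length) → PySem.List.pyGetD LABS ((a + k : Nat) : Int) [] = ls[k]) →
    ls.length = ds.length →
    (let F :=
      (PySem.List.pyRange (a : Int) ((a : Int) + (ds.length : Int)) 1).foldl
        (fun (st : List (List (List Int)) × List Int × List Int) i =>
          let patient_seq := PySem.List.pyGetD DOCS i []
          let patient_labels := PySem.List.pyGetD LABS i []
          (PySem.List.pyRange 0 (patient_seq.length : Int) 1).foldl
            (fun st j =>
              let sub_seq := PySem.List.slice patient_seq (some 0) (some (j + 1))
              let seq_hc := sub_seq.foldl
                (fun seq_hc visit =>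
                  let visit_hc := List.replicate (pvNumCodes - 1).toNat (0 : Int)
                  let visit_hc := visit.foldl (fun hc mcode => PySem.List.pySetD hc (mcode - 1) 1) visit_hc
                  seq_hc ++ [visit_hc]) []
              (st.1 ++ [seq_hc], st.2.1 ++ [PySem.List.pyGetD patient_labels j 0], st.2.2 ++ [i]))
            st)
        st
     (F.1, F.2.1)) = (ds.zip ls).foldl pvStepSem (st.1, st.2.1) := by
  intro ds
  induction ds with
  | nil =>
    intro ls a st hd hl hlen
    simp [PySem.List.pyRange_one_eq_nil]
  | cons d rest ih =>
    intro ls a st hd hl hlen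
    cases ls with
    | nil => simp at hlen
    | cons l ls' =>
      simp only []
      have hcons : PySem.List.pyRange (a : Int) ((a : Int) + ((d :: rest).length : Int)) 1
          = (a : Int) :: PySem.List.pyRange ((a : Int) + 1) ((a : Int) + ((d :: rest).length : Int)) 1 := by
        apply PySem.List.pyRange_one_cons
        simp only [List.length_cons]
        push_cast
        omega
      rw [hcons]
      simp only [List.foldl_cons]
      have hd0 : PySem.List.pyGetD DOCS (a : Int) [] = d := by
        have := hd 0 (by simp)
        simpa using this
      have hl0 : PySem.List.pyGetD LABS (a : Int) [] = l := by
        have := hl 0 (by simp)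
        simpa using this
      rw [hd0, hl0]
      -- rewrite the inner per-visit folds to pvEncodeVisit, then close the j-loop
      simp only [pv_enc_eq, PySem.List.foldl_append_singleton_eq_map, List.nil_append]
      rw [pv_A_inner d l (a : Int) d.length]
      have hend : (a : Int) + ((d :: rest).length : Int) = ((a + 1 : Nat) : Int) + (rest.length : Int) := by
        simp only [List.length_cons]; push_cast; ring
      rw [hend]
      have := ih ls' (a + 1)
        (st.1 ++ (List.range d.length).map (fun k => (d.take (k + 1)).map pvEncodeVisit),
         st.2.1 ++ (List.range d.length).map (fun k : Nat => PySem.List.pyGetD l (k : Int) 0),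
         st.2.2 ++ List.replicate d.length (a : Int))
        (fun k hk => by have := hd (k + 1) (by simpa using Nat.succ_lt_succ hk); simpa [Nat.add_assoc, Nat.add_comm 1 k] using this)
        (fun k hk => by have := hl (k + 1) (by simpa using Nat.succ_lt_succ hk); simpa [Nat.add_assoc, Nat.add_comm 1 k] using this)
        (by simpa using hlen)
      simp only [pv_enc_eq, PySem.List.foldl_append_singleton_eq_map, List.nil_append,
        Nat.cast_add, Nat.cast_one] at this ⊢
      rw [this]
      simp [pvStepSem]

-- docs.zip labels only reads the first docs.length label rows
theorem pv_zip_take (docs : List (List (List Int))) (labels : List (List Int)) :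
    docs.zip (labels.take docs.length) = docs.zip labels := by
  induction docs generalizing labels with
  | nil => simp
  | cons d rest ih =>
    cases labels with
    | nil => simp
    | cons l ls => simp [ih]

-- ===== VERDICT (by name: the statement is the Claim_ definition above) =====
theorem split_sequence_hot_code_spec : Claim_equal_split_sequence_hot_code := by
  intro docs labels _ hpre
  obtain ⟨hlen, -⟩ := hpre
  unfold Spec_split_sequence_hot_code split_sequence_hot_code split_sequence_hot_code_alt
  -- B side: every per-patient step is pvStepSem
  have hB : (docs.zip labels).foldl
      (fun (st : List (List (List Int)) × List Int) pl =>
        let hots := pl.1.map pvEncodeVisit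
        let r :=
          (PySem.List.enumerate hots).foldl
            (fun (t : List (List Int) × List (List (List Int)) × List Int) jh =>
              let pfx := t.1 ++ [jh.2]
              (pfx, t.2.1 ++ [pfx], t.2.2 ++ [PySem.List.pyGetD pl.2 jh.1 0]))
            ([], st.1, st.2)
        (r.2.1, r.2.2)) ([], [])
      = (docs.zip labels).foldl pvStepSem ([], []) := by
    congr 1
    funext st pl
    exact pv_B_step st pl
  -- A side: the outer fold, projected, is the same fold of pvStepSem
  have hA := pv_A_outer docs labels docs (labels.take docs.length) 0 ([], [], [])
    (fun k hk => by simp [List.getElem?_eq_getElem hk])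
    (fun k hk => by
      have hk2 : k < docs.length := by simpa [hlen] using hk
      have hk' : k < labels.length := lt_of_lt_of_le hk2 hlen
      simp [List.getElem?_eq_getElem hk', List.getElem_take])
    (by simp [hlen])
  simp only [Nat.cast_zero, zero_add] at hA
  rw [pv_zip_take] at hA
  simp only [] at hA ⊢
  rw [hB]
  rw [← hA]
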